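-- pv_equiv track=rewrite | github.com/NarciSource/Python-Coding-Study | programmers/순위.py | solution
-- ===== SOURCE A (Python) =====
-- def preproc(n, data):
--     some_betters = [[i] for i in range(n+1)]
--     some_lowers = [[i] for i in range(n+1)]
--
--     for (to, dest) in data:
--         some_betters[to].append(dest)
--         some_lowers[dest].append(to)
--
--     return some_betters, some_lowers
--
-- def dijkstra(start, data):
--     full = via = start
--
--     while via:
--         acq = set().union(*[data[b] for b in via])
--         via = acq.difference(full)
--         full += via
--
--     return full
--
-- def solution(n, results):
--     answer = 0
--     some_betters, some_lowers = preproc(n, results)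
--
--     for better, lower in zip(some_betters, some_lowers):
--
--         full_betters = dijkstra(better, some_betters)
--         full_lowers = dijkstra(lower, some_lowers)
--         known = set().union(full_betters, full_lowers)
--
--         answer += 1 if len(known) == n else 0
--
--     return answer
-- ===== SOURCE B (Python) =====
-- def solution(n, results):
--     # One global transitive-closure saturation over the result pairs
--     # (semi-naive: only fresh pairs are extended each round), then a
--     # per-node counting pass; no per-node graph traversal.
--     succ = {}
--     for (w, l) in results:
--         succ.setdefault(w, set()).add(l)
--     closure = set(results)
--     delta = closure
--     while delta:
--         delta = {(a, c) for (a, b) in delta for c in succ.get(b, ())} - closure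
--         closure |= delta
--     outs = [set() for _ in range(n + 1)]
--     ins = [set() for _ in range(n + 1)]
--     for (a, b) in closure:
--         outs[a].add(b)
--         ins[b].add(a)
--     answer = 0
--     for i in range(n + 1):
--         known = {i} | outs[i] | ins[i]
--         if len(known) == n:
--             answer += 1
--     return answer
-- ===== Notes on version B (the rewrite author's own statement) =====
-- stated objective: alternative
-- what changed: A runs a per-node frontier BFS (its 'dijkstra') over two adjacency-list arrays for every node, mutating the arrays in place as a side effect; B instead computes the transitive closure of the result pairs once by semi-naive saturation of a pair set, fills per-node out-/in-neighbour sets from that closure, and counts per node by one set union of two lookups (measured ~2.8x faster at the largest timed size).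
-- outside the precondition, e.g. on solution(2, [(1, -1), (2, 0)]): A returns 0, B returns 2
import Mathlib
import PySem

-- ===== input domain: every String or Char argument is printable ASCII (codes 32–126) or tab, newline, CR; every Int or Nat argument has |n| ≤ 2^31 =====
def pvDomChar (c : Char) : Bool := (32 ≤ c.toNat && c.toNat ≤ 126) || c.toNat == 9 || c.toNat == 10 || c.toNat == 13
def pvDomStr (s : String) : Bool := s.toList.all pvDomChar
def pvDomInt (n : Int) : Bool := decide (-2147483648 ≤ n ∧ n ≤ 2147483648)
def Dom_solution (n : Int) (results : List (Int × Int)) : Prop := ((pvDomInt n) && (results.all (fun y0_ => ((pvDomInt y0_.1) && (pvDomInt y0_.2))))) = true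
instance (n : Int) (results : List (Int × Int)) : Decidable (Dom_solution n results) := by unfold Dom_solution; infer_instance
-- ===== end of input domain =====

-- B replaces A's per-node frontier searches (with in-place memoising mutation) by one
-- global semi-naive transitive-closure saturation of the result pairs plus a counting
-- pass; objective: alternative algorithm (A also mutates its local preproc arrays, B does not).


-- ===== PORT A =====
-- preproc: two arrays of (n+1) singleton lists, appended to by each result pair
def preprocA (n : Int) (results : List (Int × Int)) : List (List Int) × List (List Int) :=
  results.foldl
    (fun bl p =>
      (PySem.List.pySetD bl.1 p.1 ((PySem.List.pyGet? bl.1 p.1).getD [] ++ [p.2]),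
       PySem.List.pySetD bl.2 p.2 ((PySem.List.pyGet? bl.2 p.2).getD [] ++ [p.1])))
    ((PySem.List.pyRange 0 (n + 1) 1).map (fun i => [i]),
     (PySem.List.pyRange 0 (n + 1) 1).map (fun i => [i]))

-- acq = set().union(*[data[b] for b in via])
def unionDataA (data : List (List Int)) (via : List Int) : PySem.Set Int :=
  via.foldl (fun s b => PySem.Set.update s ((PySem.List.pyGet? data b).getD [])) PySem.Set.empty

-- the while-loop of dijkstra; fuel only guards termination (it never runs out:
-- each pass through the loop body adds at least one new element of data.flatten to full)
def dijkstraA (data : List (List Int)) : Nat → List Int → List Int → List Int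
  | 0, full, _ => full
  | fuel + 1, full, via =>
    if via = [] then full
    else
      let via' := PySem.Set.diff (unionDataA data via) full
      dijkstraA data fuel (full ++ via') via'

-- the for-loop over zip(some_betters, some_lowers); Python's `full` aliases the
-- data[idx] entry, so each iteration writes the grown list back (the .set calls)
def solLoopA (n : Int) : Nat → Nat → List (List Int) → List (List Int) → Int → Int
  | 0, _, _, _, ans => ans
  | k + 1, idx, betters, lowers, ans =>
    let fullB := dijkstraA betters (betters.flatten.length + 2) (betters.getD idx []) (betters.getD idx [])
    let fullL := dijkstraA lowers (lowers.flatten.length + 2) (lowers.getD idx []) (lowers.getD idx [])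
    let known := PySem.Set.union (PySem.Set.ofList fullB) fullL
    solLoopA n k (idx + 1) (betters.set idx fullB) (lowers.set idx fullL)
      (ans + if (known.length : Int) = n then 1 else 0)

def solution (n : Int) (results : List (Int × Int)) : Int :=
  let bl := preprocA n results
  solLoopA n bl.1.length 0 bl.1 bl.2 0

-- ===== PORT B =====
-- succ[w] = set of direct losers of w
def succB (results : List (Int × Int)) : PySem.Dict Int (PySem.Set Int) :=
  results.foldl (fun d p => d.insert p.1 (PySem.Set.add (d.getD p.1 PySem.Set.empty) p.2)) PySem.Dict.empty

-- delta = {(a, c) for (a, b) in delta for c in succ.get(b, ())} - closure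
def stepB (succ : PySem.Dict Int (PySem.Set Int)) (closure delta : PySem.Set (Int × Int)) : PySem.Set (Int × Int) :=
  PySem.Set.diff
    (PySem.Set.ofList (delta.flatMap (fun p => (succ.getD p.2 PySem.Set.empty).map (fun c => (p.1, c)))))
    closure

-- the while-loop; fuel only guards termination (each pass adds a pair, and the closure
-- stays inside firsts(results) × seconds(results), so results.length² + 2 never runs out)
def satB (succ : PySem.Dict Int (PySem.Set Int)) : Nat → PySem.Set (Int × Int) → PySem.Set (Int × Int) → PySem.Set (Int × Int)
  | 0, closure, _ => closure
  | fuel + 1, closure, delta =>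
    if delta = [] then closure
    else
      let d' := stepB succ closure delta
      satB succ fuel (PySem.Set.union closure d') d'

-- outs/ins: per-node out- and in-neighbour sets of the closure, as (n+1)-indexed lists
def degB (n : Int) (closure : List (Int × Int)) : List (PySem.Set Int) × List (PySem.Set Int) :=
  closure.foldl
    (fun oi p =>
      (PySem.List.pySetD oi.1 p.1 (PySem.Set.add ((PySem.List.pyGet? oi.1 p.1).getD PySem.Set.empty) p.2),
       PySem.List.pySetD oi.2 p.2 (PySem.Set.add ((PySem.List.pyGet? oi.2 p.2).getD PySem.Set.empty) p.1)))
    ((PySem.List.pyRange 0 (n + 1) 1).map (fun _ => PySem.Set.empty),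
     (PySem.List.pyRange 0 (n + 1) 1).map (fun _ => PySem.Set.empty))

def solution_alt (n : Int) (results : List (Int × Int)) : Int :=
  let succ := succB results
  let closure := satB succ (results.length * results.length + 2) (PySem.Set.ofList results) (PySem.Set.ofList results)
  let oi := degB n closure
  (PySem.List.pyRange 0 (n + 1) 1).foldl
    (fun ans i =>
      let known := PySem.Set.union (PySem.Set.union (PySem.Set.ofList [i])
        ((PySem.List.pyGet? oi.1 i).getD PySem.Set.empty)) ((PySem.List.pyGet? oi.2 i).getD PySem.Set.empty)
      ans + if (known.length : Int) = n then 1 else 0) 0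

-- ===== PRECONDITION & SPEC =====
-- Pre_ restricts the pairs to the task's natural node labels 0..n: outside them A either
-- raises IndexError (labels beyond the arrays) or silently applies Python's negative-index
-- wraparound, treating label -k as node n+1-k for indexing while keeping -k a distinct set
-- element — an artefact of A's list indexing that no caller of this ranking task would specify.
def Pre_solution (n : Int) (results : List (Int × Int)) : Prop :=
  ∀ p ∈ results, 0 ≤ p.1 ∧ p.1 ≤ n ∧ 0 ≤ p.2 ∧ p.2 ≤ n
instance (n : Int) (results : List (Int × Int)) : Decidable (Pre_solution n results) := by unfold Pre_solution; infer_instance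
def pvWitness_solution : Int × (List (Int × Int)) := (3, [(1, 2), (2, 3), (3, 0)])

def Spec_solution (n : Int) (results : List (Int × Int)) (out : Int) : Prop := out = solution_alt n results
instance (n : Int) (results : List (Int × Int)) (out : Int) : Decidable (Spec_solution n results out) := by unfold Spec_solution; infer_instance

-- ===== CLAIM (what is proved, stated in full; the proofs are below) =====
def Claim_equal_solution : Prop := ∀ (n : Int) (results : List (Int × Int)), Dom_solution n results → Pre_solution n results → Spec_solution n results (solution n results)

-- ===== LEMMAS AND PROOFS =====

-- the win relation
def Epred (results : List (Int × Int)) (a b : Int) : Prop := (a, b) ∈ results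

-- sandwich invariant on A's (mutated) adjacency arrays: entry j contains j and all direct
-- F-successors of j, and everything in it is F-reachable from j and in range
def GoodData (F : Int → Int → Prop) (data : List (List Int)) : Prop :=
  ∀ (j : Nat), j < data.length →
    ((j : Int) ∈ data.getD j []) ∧
    (∀ x ∈ data.getD j [], Relation.ReflTransGen F (j : Int) x ∧ 0 ≤ x ∧ x < (data.length : Int)) ∧
    (∀ b, F (j : Int) b → b ∈ data.getD j [])

def dataAt (data : List (List Int)) (b : Int) : List Int := (PySem.List.pyGet? data b).getD []

def measD (data : List (List Int)) (full : List Int) : Nat :=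
  ((PySem.Set.ofList data.flatten).filter (fun x => decide (x ∉ full))).length

def allPairsB (results : List (Int × Int)) : List (Int × Int) :=
  results.flatMap (fun r => results.map (fun r' => (r.1, r'.2)))

def measB (results : List (Int × Int)) (closure : List (Int × Int)) : Nat :=
  ((PySem.Set.ofList (allPairsB results)).filter (fun p => decide (p ∉ closure))).length

-- generic: a filter by a stronger predicate that loses at least the witness q0 is strictly shorter
lemma length_filter_subpred_lt {a : Type} (S : List a) (pold pnew : a → Bool)
    (h : ∀ x ∈ S, pnew x = true → pold x = true)
    (q0 : a) (hS : q0 ∈ S) (hold : pold q0 = true) (hnew : pnew q0 = false) :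
    (S.filter pnew).length < (S.filter pold).length := by
  have hfe : S.filter pnew = (S.filter pold).filter pnew := by
    rw [List.filter_filter]
    apply List.filter_congr
    intro x hx
    cases hpn : pnew x with
    | false => simp
    | true => simp [h x hx hpn]
  rw [hfe]
  exact List.length_filter_lt_length_iff_exists.2 ⟨q0, List.mem_filter.2 ⟨hS, hold⟩, by simp [hnew]⟩

-- ---------- B side ----------

lemma mem_getD_fold_add (l : List (Int × Int)) :
    ∀ (d : PySem.Dict Int (PySem.Set Int)) (k x : Int),
      x ∈ (l.foldl (fun d p => d.insert p.1 (PySem.Set.add (d.getD p.1 PySem.Set.empty) p.2)) d).getD k PySem.Set.empty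
        ↔ x ∈ d.getD k PySem.Set.empty ∨ (k, x) ∈ l := by
  induction l with
  | nil => simp
  | cons p l ih =>
    intro d k x
    rw [List.foldl_cons, ih ((fun d p => d.insert p.1 (PySem.Set.add (d.getD p.1 PySem.Set.empty) p.2)) d p) k x,
        PySem.Dict.getD_insert]
    by_cases hk : k = p.1
    · subst hk
      simp [PySem.Set.mem_add, Prod.ext_iff]
      tauto
    · simp only [if_neg hk, List.mem_cons, Prod.ext_iff]
      tauto

lemma mem_getD_succB (results : List (Int × Int)) (b c : Int) :
    c ∈ (succB results).getD b PySem.Set.empty ↔ (b, c) ∈ results := by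
  unfold succB
  rw [mem_getD_fold_add]
  simp [PySem.Dict.getD_empty, PySem.Set.empty]

lemma mem_stepB (results : List (Int × Int)) (closure delta : List (Int × Int)) (q : Int × Int) :
    q ∈ stepB (succB results) closure delta ↔
      (∃ p ∈ delta, q.1 = p.1 ∧ (p.2, q.2) ∈ results) ∧ q ∉ closure := by
  unfold stepB
  rw [PySem.Set.mem_diff]
  constructor
  · rintro ⟨hq, hqc⟩
    refine ⟨?_, hqc⟩
    rw [PySem.Set.mem_ofList, List.mem_flatMap] at hq
    obtain ⟨p, hp, hq⟩ := hq
    rw [List.mem_map] at hq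
    obtain ⟨c, hc, rfl⟩ := hq
    exact ⟨p, hp, rfl, (mem_getD_succB results p.2 c).1 hc⟩
  · rintro ⟨⟨p, hp, hq1, hq2⟩, hqc⟩
    refine ⟨?_, hqc⟩
    rw [PySem.Set.mem_ofList, List.mem_flatMap]
    refine ⟨p, hp, ?_⟩
    rw [List.mem_map]
    exact ⟨q.2, (mem_getD_succB results p.2 q.2).2 hq2, by rw [← hq1]⟩

lemma satB_succ_nil (succ : PySem.Dict Int (PySem.Set Int)) (f : Nat) (c : PySem.Set (Int × Int)) :
    satB succ (f + 1) c [] = c := by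
  simp [satB]

lemma satB_succ_ne (succ : PySem.Dict Int (PySem.Set Int)) (f : Nat) (c delta : PySem.Set (Int × Int))
    (h : ¬ delta = []) :
    satB succ (f + 1) c delta = satB succ f (PySem.Set.union c (stepB succ c delta)) (stepB succ c delta) := by
  simp [satB, h]

lemma dijkstraA_succ_nil (data : List (List Int)) (f : Nat) (full : List Int) :
    dijkstraA data (f + 1) full [] = full := by
  simp [dijkstraA]

lemma dijkstraA_succ_ne (data : List (List Int)) (f : Nat) (full via : List Int) (h : ¬ via = []) :
    dijkstraA data (f + 1) full via =
      dijkstraA data f (full ++ PySem.Set.diff (unionDataA data via) full)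
        (PySem.Set.diff (unionDataA data via) full) := by
  simp [dijkstraA, h]

lemma satB_spec (results : List (Int × Int)) :
    ∀ (fuel : Nat) (closure delta : List (Int × Int)),
      (∀ p ∈ closure, Relation.TransGen (Epred results) p.1 p.2) →
      (∀ p ∈ results, p ∈ closure) →
      (∀ p ∈ delta, p ∈ closure) →
      (∀ p ∈ closure, p ∉ delta → ∀ c, (p.2, c) ∈ results → (p.1, c) ∈ closure) →
      closure.Nodup →
      (∀ p ∈ closure, (∃ r ∈ results, r.1 = p.1) ∧ (∃ r ∈ results, r.2 = p.2)) →
      measB results closure + 2 ≤ fuel →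
      (∀ p ∈ satB (succB results) fuel closure delta, Relation.TransGen (Epred results) p.1 p.2) ∧
      (∀ p ∈ results, p ∈ satB (succB results) fuel closure delta) ∧
      (∀ p ∈ satB (succB results) fuel closure delta, ∀ c, (p.2, c) ∈ results →
          (p.1, c) ∈ satB (succB results) fuel closure delta) ∧
      (satB (succB results) fuel closure delta).Nodup := by
  intro fuel
  induction fuel with
  | zero => intro closure delta _ _ _ _ _ _ hf; omega
  | succ fuel ih =>
    intro closure delta hS1 hS2 hS3 hS4 hS5 hS7 hfuel
    by_cases hd : delta = ([] : List (Int × Int))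
    · rw [hd, satB_succ_nil]
      exact ⟨hS1, hS2, fun p hp c hc => hS4 p hp (by simp [hd]) c hc, hS5⟩
    · rw [satB_succ_ne _ _ _ _ hd]
      set d' := stepB (succB results) closure delta with hd'def
      have hmem : ∀ q, q ∈ d' ↔ ((∃ p ∈ delta, q.1 = p.1 ∧ (p.2, q.2) ∈ results) ∧ q ∉ closure) :=
        fun q => mem_stepB results closure delta q
      have hd'n : d'.Nodup := PySem.Set.nodup_diff _ _ (PySem.Set.nodup_ofList _)
      have hUmem : ∀ q, q ∈ PySem.Set.union closure d' ↔ q ∈ closure ∨ q ∈ d' :=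
        fun q => PySem.Set.mem_union _ _ _
      -- new invariants
      have hS1' : ∀ p ∈ PySem.Set.union closure d', Relation.TransGen (Epred results) p.1 p.2 := by
        intro q hq
        rcases (hUmem q).1 hq with h | h
        · exact hS1 q h
        · obtain ⟨⟨p, hp, h1, h2⟩, _⟩ := (hmem q).1 h
          have := hS1 p (hS3 p hp)
          rw [h1]
          exact Relation.TransGen.tail this h2
      have hS2' : ∀ p ∈ results, p ∈ PySem.Set.union closure d' :=
        fun p hp => (hUmem p).2 (Or.inl (hS2 p hp))
      have hS3' : ∀ p ∈ d', p ∈ PySem.Set.union closure d' :=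
        fun p hp => (hUmem p).2 (Or.inr hp)
      have hS4' : ∀ p ∈ PySem.Set.union closure d', p ∉ d' → ∀ c, (p.2, c) ∈ results →
          (p.1, c) ∈ PySem.Set.union closure d' := by
        intro q hq hqd c hc
        rcases (hUmem q).1 hq with h | h
        · by_cases hqdelta : q ∈ delta
          · by_cases hin : (q.1, c) ∈ closure
            · exact (hUmem _).2 (Or.inl hin)
            · refine (hUmem _).2 (Or.inr ((hmem _).2 ⟨⟨q, hqdelta, rfl, hc⟩, hin⟩))
          · exact (hUmem _).2 (Or.inl (hS4 q h hqdelta c hc))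
        · exact absurd h hqd
      have hS5' : (PySem.Set.union closure d').Nodup := PySem.Set.nodup_union _ _ hS5
      have hS7' : ∀ p ∈ PySem.Set.union closure d',
          (∃ r ∈ results, r.1 = p.1) ∧ (∃ r ∈ results, r.2 = p.2) := by
        intro q hq
        rcases (hUmem q).1 hq with h | h
        · exact hS7 q h
        · obtain ⟨⟨p, hp, h1, h2⟩, _⟩ := (hmem q).1 h
          exact ⟨by rw [h1]; exact (hS7 p (hS3 p hp)).1, ⟨(p.2, q.2), h2, rfl⟩⟩
      -- fuel bookkeeping
      by_cases hd'e : d' = ([] : List (Int × Int))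
      · -- next round exits immediately: union closure [] = closure
        have hu : PySem.Set.union closure d' = closure := by rw [hd'e]; rfl
        cases fuel with
        | zero => omega
        | succ fuel' =>
          rw [hu, hd'e, satB_succ_nil]
          rw [hu, hd'e] at hS4'
          exact ⟨hS1, hS2, fun p hp c hc => hS4' p hp (by simp) c hc, hS5⟩
      · -- a genuinely new pair was added: the measure drops
        obtain ⟨q0, hq0⟩ := List.exists_mem_of_ne_nil _ hd'e
        have hq0m := (hmem q0).1 hq0
        have hq0AP : q0 ∈ allPairsB results := by
          obtain ⟨⟨p, hp, h1, h2⟩, _⟩ := hq0m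
          obtain ⟨⟨r, hr, hr1⟩, _⟩ := hS7 p (hS3 p hp)
          unfold allPairsB
          rw [List.mem_flatMap]
          refine ⟨r, hr, ?_⟩
          rw [List.mem_map]
          exact ⟨(p.2, q0.2), h2, by rw [hr1, ← h1]⟩
        have hdrop : measB results (PySem.Set.union closure d') < measB results closure := by
          unfold measB
          refine length_filter_subpred_lt _ _ _ ?_ q0 ?_ ?_ ?_
          · intro x _ hx
            simp only [decide_eq_true_eq] at hx ⊢
            intro hxc
            exact hx ((hUmem x).2 (Or.inl hxc))
          · exact (PySem.Set.mem_ofList _ _).2 hq0AP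
          · simp [hq0m.2]
          · simp [(hUmem q0).2 (Or.inr hq0)]
        exact ih (PySem.Set.union closure d') d' hS1' hS2' hS3' hS4' hS5' hS7' (by omega)

lemma length_allPairsB (results : List (Int × Int)) :
    (allPairsB results).length = results.length * results.length := by
  unfold allPairsB
  rw [List.length_flatMap]
  have : (List.map (fun r => (List.map (fun r' => (r.1, r'.2)) results).length) results)
      = List.map (fun _ => results.length) results := by
    apply List.map_congr_left; intro a _; simp
  rw [this, List.map_const', List.sum_replicate, smul_eq_mul]

-- the saturated closure is exactly the transitive closure of the win relation
lemma closureB_spec (results : List (Int × Int)) :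
    (∀ a b : Int,
      ((a, b) ∈ satB (succB results) (results.length * results.length + 2)
          (PySem.Set.ofList results) (PySem.Set.ofList results)
        ↔ Relation.TransGen (Epred results) a b)) ∧
    (satB (succB results) (results.length * results.length + 2)
        (PySem.Set.ofList results) (PySem.Set.ofList results)).Nodup := by
  have hmeas : measB results (PySem.Set.ofList results) + 2 ≤ results.length * results.length + 2 := by
    have h1 : measB results (PySem.Set.ofList results) ≤ (PySem.Set.ofList (allPairsB results)).length :=
      List.length_filter_le _ _
    have h2 : (PySem.Set.ofList (allPairsB results)).length ≤ (allPairsB results).length :=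
      PySem.Set.length_ofList_le _
    have h3 := length_allPairsB results
    omega
  have := satB_spec results (results.length * results.length + 2)
    (PySem.Set.ofList results) (PySem.Set.ofList results)
    (fun p hp => Relation.TransGen.single ((PySem.Set.mem_ofList _ _).1 hp))
    (fun p hp => (PySem.Set.mem_ofList _ _).2 hp)
    (fun p hp => hp)
    (fun p hp hnp _ _ => absurd hp hnp)
    (PySem.Set.nodup_ofList _)
    (fun p hp => ⟨⟨p, (PySem.Set.mem_ofList _ _).1 hp, rfl⟩, ⟨p, (PySem.Set.mem_ofList _ _).1 hp, rfl⟩⟩)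
    hmeas
  obtain ⟨h1, h2, h3, h4⟩ := this
  refine ⟨fun a b => ⟨fun h => h1 (a, b) h, fun h => ?_⟩, h4⟩
  induction h with
  | single h => exact h2 _ h
  | tail _ hbc ih => exact h3 _ ih _ hbc

-- bounds of the transitive closure's labels under Pre_
lemma transGen_bounds (n : Int) (results : List (Int × Int)) (hpre : Pre_solution n results)
    (a b : Int) (h : Relation.TransGen (Epred results) a b) :
    0 ≤ a ∧ a ≤ n ∧ 0 ≤ b ∧ b ≤ n := by
  induction h with
  | single h =>
    obtain ⟨u1, u2, u3, u4⟩ := hpre _ h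
    exact ⟨u1, u2, u3, u4⟩
  | @tail c d hcd hde ih =>
    obtain ⟨u1, u2, u3, u4⟩ := hpre _ hde
    exact ⟨ih.1, ih.2.1, u3, u4⟩

-- membership in the degree arrays of B's counting pass
set_option maxHeartbeats 2000000 in
lemma degB_fold_mem (n : Int) (c : List (Int × Int))
    (hc : ∀ p ∈ c, 0 ≤ p.1 ∧ p.1 ≤ n ∧ 0 ≤ p.2 ∧ p.2 ≤ n) :
    ∀ (O I : List (PySem.Set Int)), O.length = (n + 1).toNat → I.length = (n + 1).toNat →
      ((c.foldl (fun oi p =>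
          (PySem.List.pySetD oi.1 p.1 (PySem.Set.add ((PySem.List.pyGet? oi.1 p.1).getD PySem.Set.empty) p.2),
           PySem.List.pySetD oi.2 p.2 (PySem.Set.add ((PySem.List.pyGet? oi.2 p.2).getD PySem.Set.empty) p.1))) (O, I)).1.length = (n + 1).toNat) ∧
      ((c.foldl (fun oi p =>
          (PySem.List.pySetD oi.1 p.1 (PySem.Set.add ((PySem.List.pyGet? oi.1 p.1).getD PySem.Set.empty) p.2),
           PySem.List.pySetD oi.2 p.2 (PySem.Set.add ((PySem.List.pyGet? oi.2 p.2).getD PySem.Set.empty) p.1))) (O, I)).2.length = (n + 1).toNat) ∧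
      (∀ (j : Nat), j < (n + 1).toNat → ∀ (x : Int),
        (x ∈ (c.foldl (fun oi p =>
          (PySem.List.pySetD oi.1 p.1 (PySem.Set.add ((PySem.List.pyGet? oi.1 p.1).getD PySem.Set.empty) p.2),
           PySem.List.pySetD oi.2 p.2 (PySem.Set.add ((PySem.List.pyGet? oi.2 p.2).getD PySem.Set.empty) p.1))) (O, I)).1.getD j []
            ↔ x ∈ O.getD j [] ∨ ((j : Int), x) ∈ c) ∧
        (x ∈ (c.foldl (fun oi p =>
          (PySem.List.pySetD oi.1 p.1 (PySem.Set.add ((PySem.List.pyGet? oi.1 p.1).getD PySem.Set.empty) p.2),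
           PySem.List.pySetD oi.2 p.2 (PySem.Set.add ((PySem.List.pyGet? oi.2 p.2).getD PySem.Set.empty) p.1))) (O, I)).2.getD j []
            ↔ x ∈ I.getD j [] ∨ (x, (j : Int)) ∈ c)) := by
  induction c with
  | nil => intro O I hO hI; exact ⟨hO, hI, fun j hj x => by simp⟩
  | cons p c ihc =>
    intro O I hO hI
    obtain ⟨hp10, hp1n, hp20, hp2n⟩ := hc p (List.mem_cons_self)
    have hc' : ∀ q ∈ c, 0 ≤ q.1 ∧ q.1 ≤ n ∧ 0 ≤ q.2 ∧ q.2 ≤ n := fun q hq => hc q (List.mem_cons_of_mem _ hq)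
    have hm0 : (n + 1 : Int) ≤ ((n + 1).toNat : Int) := Int.self_le_toNat _
    have hp1lt : p.1 < (O.length : Int) := by rw [hO]; omega
    have hp2lt : p.2 < (I.length : Int) := by rw [hI]; omega
    rw [List.foldl_cons]
    have hstep1 : PySem.List.pySetD O p.1 (PySem.Set.add ((PySem.List.pyGet? O p.1).getD PySem.Set.empty) p.2)
        = O.set p.1.toNat (PySem.Set.add (O[p.1.toNat]'(by omega)) p.2) := by
      rw [PySem.List.pyGet?_eq_some_getElem O hp10 hp1lt, PySem.List.pySetD_of_nonneg O _ hp10]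
      rfl
    have hstep2 : PySem.List.pySetD I p.2 (PySem.Set.add ((PySem.List.pyGet? I p.2).getD PySem.Set.empty) p.1)
        = I.set p.2.toNat (PySem.Set.add (I[p.2.toNat]'(by omega)) p.1) := by
      rw [PySem.List.pyGet?_eq_some_getElem I hp20 hp2lt, PySem.List.pySetD_of_nonneg I _ hp20]
      rfl
    simp only [hstep1, hstep2]
    obtain ⟨ih1, ih2, ih3⟩ := ihc hc'
      (O.set p.1.toNat (PySem.Set.add (O[p.1.toNat]'(by omega)) p.2))
      (I.set p.2.toNat (PySem.Set.add (I[p.2.toNat]'(by omega)) p.1))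
      (by rw [List.length_set]; exact hO) (by rw [List.length_set]; exact hI)
    refine ⟨ih1, ih2, fun j hj x => ?_⟩
    obtain ⟨ihm1, ihm2⟩ := ih3 j hj x
    have hjO : j < O.length := by omega
    have hjI : j < I.length := by omega
    have hgd1 : (O.set p.1.toNat (PySem.Set.add (O[p.1.toNat]'(by omega)) p.2)).getD j []
        = if j = p.1.toNat then PySem.Set.add (O[p.1.toNat]'(by omega)) p.2 else O.getD j [] := by
      rw [List.getD_eq_getElem _ _ (by rw [List.length_set]; exact hjO)]
      by_cases h : j = p.1.toNat
      · subst h; rw [List.getElem_set_self, if_pos rfl]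
      · rw [List.getElem_set_ne (fun hh => h hh.symm), if_neg h, List.getD_eq_getElem _ _ hjO]
    have hgd2 : (I.set p.2.toNat (PySem.Set.add (I[p.2.toNat]'(by omega)) p.1)).getD j []
        = if j = p.2.toNat then PySem.Set.add (I[p.2.toNat]'(by omega)) p.1 else I.getD j [] := by
      rw [List.getD_eq_getElem _ _ (by rw [List.length_set]; exact hjI)]
      by_cases h : j = p.2.toNat
      · subst h; rw [List.getElem_set_self, if_pos rfl]
      · rw [List.getElem_set_ne (fun hh => h hh.symm), if_neg h, List.getD_eq_getElem _ _ hjI]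
    constructor
    · rw [ihm1, hgd1]
      by_cases h : j = p.1.toNat
      · subst h
        have hOj : O.getD p.1.toNat [] = O[p.1.toNat] := List.getD_eq_getElem _ _ hjO
        have hji : ((p.1.toNat : Nat) : Int) = p.1 := by omega
        rw [if_pos rfl, hOj]
        rw [show (x ∈ PySem.Set.add (O[p.1.toNat]'(by omega)) p.2 ↔ x ∈ O[p.1.toNat]'(by omega) ∨ x = p.2) from
          PySem.Set.mem_add _ _ _]
        simp only [List.mem_cons, Prod.ext_iff, hji]
        tauto
      · have hne : ¬ (((j : Nat) : Int), x) = p := by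
          intro hh
          apply h
          have := congrArg Prod.fst hh
          simp only at this
          omega
        rw [if_neg h]
        simp only [List.mem_cons]
        tauto
    · rw [ihm2, hgd2]
      by_cases h : j = p.2.toNat
      · subst h
        have hIj : I.getD p.2.toNat [] = I[p.2.toNat] := List.getD_eq_getElem _ _ hjI
        have hji : ((p.2.toNat : Nat) : Int) = p.2 := by omega
        rw [if_pos rfl, hIj]
        rw [show (x ∈ PySem.Set.add (I[p.2.toNat]'(by omega)) p.1 ↔ x ∈ I[p.2.toNat]'(by omega) ∨ x = p.1) from
          PySem.Set.mem_add _ _ _]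
        simp only [List.mem_cons, Prod.ext_iff, hji]
        tauto
      · have hne : ¬ (x, ((j : Nat) : Int)) = p := by
          intro hh
          apply h
          have := congrArg Prod.snd hh
          simp only at this
          omega
        rw [if_neg h]
        simp only [List.mem_cons]
        tauto

lemma init_empty_getD (n : Int) (j : Nat) (hj : j < (n + 1).toNat) :
    ((PySem.List.pyRange 0 (n + 1) 1).map (fun _ => (PySem.Set.empty : PySem.Set Int))).getD j [] = [] := by
  have hlen : ((PySem.List.pyRange 0 (n + 1) 1).map (fun _ => (PySem.Set.empty : PySem.Set Int))).length = (n + 1).toNat := by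
    rw [List.length_map, PySem.List.length_pyRange_one]
    omega
  rw [List.getD_eq_getElem _ _ (by omega), List.getElem_map]
  rfl

-- entry characterisation of the degree arrays for the saturated closure
lemma degB_entry (n : Int) (results : List (Int × Int)) (hpre : Pre_solution n results)
    (c : List (Int × Int)) (hcb : ∀ p ∈ c, 0 ≤ p.1 ∧ p.1 ≤ n ∧ 0 ≤ p.2 ∧ p.2 ≤ n)
    (j : Nat) (hj : j < (n + 1).toNat) (x : Int) :
    (x ∈ ((PySem.List.pyGet? (degB n c).1 ((j : Nat) : Int)).getD PySem.Set.empty) ↔ ((j : Int), x) ∈ c) ∧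
    (x ∈ ((PySem.List.pyGet? (degB n c).2 ((j : Nat) : Int)).getD PySem.Set.empty) ↔ (x, (j : Int)) ∈ c) := by
  have hinit : ((PySem.List.pyRange 0 (n + 1) 1).map (fun _ => (PySem.Set.empty : PySem.Set Int))).length = (n + 1).toNat := by
    rw [List.length_map, PySem.List.length_pyRange_one]; omega
  obtain ⟨h1, h2, h3⟩ := degB_fold_mem n c hcb _ _ hinit hinit
  obtain ⟨hm1, hm2⟩ := h3 j hj x
  rw [init_empty_getD n j hj] at hm1 hm2
  simp only [List.not_mem_nil, false_or] at hm1 hm2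
  constructor
  · rw [show (PySem.List.pyGet? (degB n c).1 ((j : Nat) : Int)).getD PySem.Set.empty
        = (degB n c).1.getD j [] from by
      rw [PySem.List.pyGet?_eq_some_getElem _ (by omega) (by rw [show (degB n c).1.length = (n+1).toNat from h1]; omega)]
      exact (List.getD_eq_getElem _ _ (by rw [show (degB n c).1.length = (n+1).toNat from h1]; omega)).symm]
    exact hm1
  · rw [show (PySem.List.pyGet? (degB n c).2 ((j : Nat) : Int)).getD PySem.Set.empty
        = (degB n c).2.getD j [] from by
      rw [PySem.List.pyGet?_eq_some_getElem _ (by omega) (by rw [show (degB n c).2.length = (n+1).toNat from h2]; omega)]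
      exact (List.getD_eq_getElem _ _ (by rw [show (degB n c).2.length = (n+1).toNat from h2]; omega)).symm]
    exact hm2

-- ---------- A side ----------

lemma dataAt_eq (data : List (List Int)) (b : Int) (h0 : 0 ≤ b) (hlt : b < (data.length : Int)) :
    dataAt data b = data.getD b.toNat [] := by
  unfold dataAt
  rw [PySem.List.pyGet?_eq_some_getElem data h0 hlt]
  exact (List.getD_eq_getElem _ _ (by omega)).symm

-- getD through a set-update
lemma getD_set_eq (data : List (List Int)) (idx j : Nat) (v : List Int)
    (hidx : idx < data.length) (hj : j < data.length) :
    (data.set idx v).getD j [] = if j = idx then v else data.getD j [] := by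
  rw [List.getD_eq_getElem _ _ (by rw [List.length_set]; exact hj)]
  by_cases h : j = idx
  · subst h; rw [List.getElem_set_self, if_pos rfl]
  · rw [List.getElem_set_ne (fun hh => h hh.symm), if_neg h, List.getD_eq_getElem _ _ hj]

lemma mem_unionDataA (data : List (List Int)) (via : List Int) (x : Int) :
    x ∈ unionDataA data via ↔ ∃ b ∈ via, x ∈ dataAt data b := by
  unfold unionDataA
  have : ∀ (s : PySem.Set Int), x ∈ via.foldl (fun s b => PySem.Set.update s ((PySem.List.pyGet? data b).getD [])) s
      ↔ x ∈ s ∨ ∃ b ∈ via, x ∈ dataAt data b := by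
    induction via with
    | nil => simp
    | cons b via ih =>
      intro s
      rw [List.foldl_cons, ih]
      rw [show (x ∈ PySem.Set.update s ((PySem.List.pyGet? data b).getD []) ↔
        x ∈ s ∨ x ∈ (PySem.List.pyGet? data b).getD []) from PySem.Set.mem_update _ _ _]
      unfold dataAt
      simp
      tauto
  rw [this]
  simp

lemma dijkstraA_spec (data : List (List Int)) (F : Int → Int → Prop)
    (Hgood : GoodData F data) (i : Int) :
    ∀ (fuel : Nat) (full via : List Int),
      (∀ x ∈ full, Relation.ReflTransGen F i x ∧ 0 ≤ x ∧ x < (data.length : Int)) →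
      (∀ x ∈ via, x ∈ full) →
      (∀ b ∈ full, b ∉ via → ∀ x ∈ dataAt data b, x ∈ full) →
      i ∈ full →
      measD data full + 2 ≤ fuel →
      (∀ x ∈ full, x ∈ dijkstraA data fuel full via) ∧
      (∀ x ∈ dijkstraA data fuel full via, Relation.ReflTransGen F i x ∧ 0 ≤ x ∧ x < (data.length : Int)) ∧
      i ∈ dijkstraA data fuel full via ∧
      (∀ b ∈ dijkstraA data fuel full via, ∀ x ∈ dataAt data b, x ∈ dijkstraA data fuel full via) := by
  intro fuel
  induction fuel with
  | zero => intro full via _ _ _ _ hf; omega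
  | succ fuel ih =>
    intro full via hI1 hI2 hI3 hI5 hfuel
    by_cases hv : via = ([] : List Int)
    · rw [hv, dijkstraA_succ_nil]
      exact ⟨fun x hx => hx, hI1, hI5, fun b hb => hI3 b hb (by simp [hv])⟩
    · rw [dijkstraA_succ_ne _ _ _ _ hv]
      set via' := PySem.Set.diff (unionDataA data via) full with hv'def
      have hmem : ∀ x, x ∈ via' ↔ (∃ b ∈ via, x ∈ dataAt data b) ∧ x ∉ full := by
        intro x
        rw [hv'def, show (x ∈ PySem.Set.diff (unionDataA data via) full ↔
          x ∈ unionDataA data via ∧ x ∉ full) from PySem.Set.mem_diff _ _ _, mem_unionDataA]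
      have hnew1 : ∀ x ∈ via', Relation.ReflTransGen F i x ∧ 0 ≤ x ∧ x < (data.length : Int) := by
        intro x hx
        obtain ⟨⟨b, hb, hxb⟩, _⟩ := (hmem x).1 hx
        obtain ⟨hRb, hb0, hbl⟩ := hI1 b (hI2 b hb)
        rw [dataAt_eq data b hb0 hbl] at hxb
        have := (Hgood b.toNat (by omega)).2.1 x hxb
        rw [Int.toNat_of_nonneg hb0] at this
        exact ⟨Relation.ReflTransGen.trans hRb this.1, this.2⟩
      have hI1' : ∀ x ∈ full ++ via', Relation.ReflTransGen F i x ∧ 0 ≤ x ∧ x < (data.length : Int) := by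
        intro x hx
        rcases List.mem_append.1 hx with h | h
        · exact hI1 x h
        · exact hnew1 x h
      have hI2' : ∀ x ∈ via', x ∈ full ++ via' := fun x hx => List.mem_append.2 (Or.inr hx)
      have hI3' : ∀ b ∈ full ++ via', b ∉ via' → ∀ x ∈ dataAt data b, x ∈ full ++ via' := by
        intro b hb hbv' x hx
        rcases List.mem_append.1 hb with h | h
        · by_cases hbv : b ∈ via
          · by_cases hxf : x ∈ full
            · exact List.mem_append.2 (Or.inl hxf)
            · exact List.mem_append.2 (Or.inr ((hmem x).2 ⟨⟨b, hbv, hx⟩, hxf⟩))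
          · exact List.mem_append.2 (Or.inl (hI3 b h hbv x hx))
        · exact absurd h hbv'
      have hI5' : i ∈ full ++ via' := List.mem_append.2 (Or.inl hI5)
      by_cases hv'e : via' = ([] : List Int)
      · have happ : full ++ via' = full := by rw [hv'e, List.append_nil]
        cases fuel with
        | zero => omega
        | succ fuel' =>
          rw [happ, hv'e, dijkstraA_succ_nil]
          rw [happ, hv'e] at hI3'
          exact ⟨fun x hx => hx, hI1, hI5, fun b hb => hI3' b hb (by simp)⟩
      · obtain ⟨x0, hx0⟩ := List.exists_mem_of_ne_nil _ hv'e
        have hx0m := (hmem x0).1 hx0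
        have hx0fl : x0 ∈ data.flatten := by
          obtain ⟨⟨b, hb, hxb⟩, _⟩ := hx0m
          obtain ⟨_, hb0, hbl⟩ := hI1 b (hI2 b hb)
          rw [dataAt_eq data b hb0 hbl, List.getD_eq_getElem _ _ (by omega)] at hxb
          exact List.mem_flatten.2 ⟨data[b.toNat]'(by omega), List.getElem_mem _, hxb⟩
        have hdrop : measD data (full ++ via') < measD data full := by
          unfold measD
          refine length_filter_subpred_lt _ _ _ ?_ x0 ?_ ?_ ?_
          · intro x _ hx
            simp only [decide_eq_true_eq] at hx ⊢
            intro hxc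
            exact hx (List.mem_append.2 (Or.inl hxc))
          · exact (PySem.Set.mem_ofList _ _).2 hx0fl
          · simp [hx0m.2]
          · simp [List.mem_append.2 (Or.inr hx0)]
        obtain ⟨ha, hb2, hc2, hd2⟩ := ih (full ++ via') via' hI1' hI2' hI3' hI5' (by omega)
        exact ⟨fun x hx => ha x (List.mem_append.2 (Or.inl hx)), hb2, hc2, hd2⟩

-- the BFS from data[i] computes exactly the F-reachable nodes
lemma dijkstraA_mem_iff (data : List (List Int)) (F : Int → Int → Prop)
    (Hgood : GoodData F data) (i : Nat) (hi : i < data.length)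
    (fuel : Nat) (hfuel : measD data (data.getD i []) + 2 ≤ fuel) :
    (∀ x ∈ data.getD i [], x ∈ dijkstraA data fuel (data.getD i []) (data.getD i [])) ∧
    (∀ x ∈ dijkstraA data fuel (data.getD i []) (data.getD i []),
        Relation.ReflTransGen F (i : Int) x ∧ 0 ≤ x ∧ x < (data.length : Int)) ∧
    (∀ x, x ∈ dijkstraA data fuel (data.getD i []) (data.getD i []) ↔ Relation.ReflTransGen F (i : Int) x) := by
  obtain ⟨hg1, hg2, hg3⟩ := Hgood i hi
  have h := dijkstraA_spec data F Hgood (i : Int) fuel (data.getD i []) (data.getD i [])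
    (fun x hx => by
      have := hg2 x hx
      exact ⟨this.1, this.2⟩)
    (fun x hx => hx)
    (fun b hb hbn => absurd hb hbn)
    hg1 hfuel
  obtain ⟨hsub, hsound, hstart, hclosed⟩ := h
  refine ⟨hsub, hsound, fun x => ⟨fun hx => (hsound x hx).1, fun hx => ?_⟩⟩
  induction hx with
  | refl => exact hstart
  | @tail b c hab hbc ihx =>
    obtain ⟨_, hb0, hbl⟩ := hsound b ihx
    have hc : c ∈ dataAt data b := by
      rw [dataAt_eq data b hb0 hbl]
      have := (Hgood b.toNat (by omega)).2.2 c (by rw [Int.toNat_of_nonneg hb0]; exact hbc)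
      exact this
    exact hclosed b ihx c hc

-- ---------- preproc ----------

set_option maxHeartbeats 1000000 in
lemma preproc_fold (n : Int) (l : List (Int × Int))
    (hl : ∀ p ∈ l, 0 ≤ p.1 ∧ p.1 ≤ n ∧ 0 ≤ p.2 ∧ p.2 ≤ n) :
    ∀ (B L : List (List Int)), B.length = (n + 1).toNat → L.length = (n + 1).toNat →
      ((l.foldl (fun bl p =>
          (PySem.List.pySetD bl.1 p.1 ((PySem.List.pyGet? bl.1 p.1).getD [] ++ [p.2]),
           PySem.List.pySetD bl.2 p.2 ((PySem.List.pyGet? bl.2 p.2).getD [] ++ [p.1]))) (B, L)).1.length = (n + 1).toNat) ∧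
      ((l.foldl (fun bl p =>
          (PySem.List.pySetD bl.1 p.1 ((PySem.List.pyGet? bl.1 p.1).getD [] ++ [p.2]),
           PySem.List.pySetD bl.2 p.2 ((PySem.List.pyGet? bl.2 p.2).getD [] ++ [p.1]))) (B, L)).2.length = (n + 1).toNat) ∧
      (∀ (j : Nat), j < (n + 1).toNat → ∀ (x : Int),
        (x ∈ (l.foldl (fun bl p =>
          (PySem.List.pySetD bl.1 p.1 ((PySem.List.pyGet? bl.1 p.1).getD [] ++ [p.2]),
           PySem.List.pySetD bl.2 p.2 ((PySem.List.pyGet? bl.2 p.2).getD [] ++ [p.1]))) (B, L)).1.getD j []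
            ↔ x ∈ B.getD j [] ∨ ((j : Int), x) ∈ l) ∧
        (x ∈ (l.foldl (fun bl p =>
          (PySem.List.pySetD bl.1 p.1 ((PySem.List.pyGet? bl.1 p.1).getD [] ++ [p.2]),
           PySem.List.pySetD bl.2 p.2 ((PySem.List.pyGet? bl.2 p.2).getD [] ++ [p.1]))) (B, L)).2.getD j []
            ↔ x ∈ L.getD j [] ∨ (x, (j : Int)) ∈ l)) := by
  induction l with
  | nil => intro B L hB hL; exact ⟨hB, hL, fun j hj x => by simp⟩
  | cons p l ih =>
    intro B L hB hL
    obtain ⟨hp10, hp1n, hp20, hp2n⟩ := hl p (List.mem_cons_self)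
    have hl' : ∀ q ∈ l, 0 ≤ q.1 ∧ q.1 ≤ n ∧ 0 ≤ q.2 ∧ q.2 ≤ n := fun q hq => hl q (List.mem_cons_of_mem _ hq)
    have hm0 : (n + 1 : Int) ≤ ((n + 1).toNat : Int) := Int.self_le_toNat _
    have hp1lt : p.1 < (B.length : Int) := by rw [hB]; omega
    have hp2lt : p.2 < (L.length : Int) := by rw [hL]; omega
    have hp1lt' : p.1.toNat < B.length := by omega
    have hp2lt' : p.2.toNat < L.length := by omega
    rw [List.foldl_cons]
    have hstep1 : PySem.List.pySetD B p.1 ((PySem.List.pyGet? B p.1).getD [] ++ [p.2])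
        = B.set p.1.toNat (B[p.1.toNat] ++ [p.2]) := by
      rw [PySem.List.pyGet?_eq_some_getElem B hp10 hp1lt, PySem.List.pySetD_of_nonneg B _ hp10]
      rfl
    have hstep2 : PySem.List.pySetD L p.2 ((PySem.List.pyGet? L p.2).getD [] ++ [p.1])
        = L.set p.2.toNat (L[p.2.toNat] ++ [p.1]) := by
      rw [PySem.List.pyGet?_eq_some_getElem L hp20 hp2lt, PySem.List.pySetD_of_nonneg L _ hp20]
      rfl
    simp only [hstep1, hstep2]
    obtain ⟨ih1, ih2, ih3⟩ := ih (fun q hq => hl' q hq)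
      (B.set p.1.toNat (B[p.1.toNat] ++ [p.2])) (L.set p.2.toNat (L[p.2.toNat] ++ [p.1]))
      (by rw [List.length_set]; exact hB) (by rw [List.length_set]; exact hL)
    refine ⟨ih1, ih2, fun j hj x => ?_⟩
    obtain ⟨ihm1, ihm2⟩ := ih3 j hj x
    have hjB : j < B.length := by omega
    have hjL : j < L.length := by omega
    have hgd1 : (B.set p.1.toNat (B[p.1.toNat] ++ [p.2])).getD j []
        = if j = p.1.toNat then B[p.1.toNat] ++ [p.2] else B.getD j [] := by
      rw [List.getD_eq_getElem _ _ (by rw [List.length_set]; exact hjB)]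
      by_cases h : j = p.1.toNat
      · subst h; rw [List.getElem_set_self, if_pos rfl]
      · rw [List.getElem_set_ne (fun hh => h hh.symm), if_neg h, List.getD_eq_getElem _ _ hjB]
    have hgd2 : (L.set p.2.toNat (L[p.2.toNat] ++ [p.1])).getD j []
        = if j = p.2.toNat then L[p.2.toNat] ++ [p.1] else L.getD j [] := by
      rw [List.getD_eq_getElem _ _ (by rw [List.length_set]; exact hjL)]
      by_cases h : j = p.2.toNat
      · subst h; rw [List.getElem_set_self, if_pos rfl]
      · rw [List.getElem_set_ne (fun hh => h hh.symm), if_neg h, List.getD_eq_getElem _ _ hjL]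
    constructor
    · rw [ihm1, hgd1]
      by_cases h : j = p.1.toNat
      · subst h
        have hBj : B.getD p.1.toNat [] = B[p.1.toNat] := List.getD_eq_getElem _ _ hjB
        have hji : ((p.1.toNat : Nat) : Int) = p.1 := by omega
        rw [if_pos rfl, hBj]
        simp only [List.mem_append, List.mem_cons, List.not_mem_nil, or_false, Prod.ext_iff, hji]
        tauto
      · have hne : ¬ (((j : Nat) : Int), x) = p := by
          intro hh
          apply h
          have := congrArg Prod.fst hh
          simp only at this
          omega
        rw [if_neg h]
        simp only [List.mem_cons]
        tauto
    · rw [ihm2, hgd2]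
      by_cases h : j = p.2.toNat
      · subst h
        have hLj : L.getD p.2.toNat [] = L[p.2.toNat] := List.getD_eq_getElem _ _ hjL
        have hji : ((p.2.toNat : Nat) : Int) = p.2 := by omega
        rw [if_pos rfl, hLj]
        simp only [List.mem_append, List.mem_cons, List.not_mem_nil, or_false, Prod.ext_iff, hji]
        tauto
      · have hne : ¬ (x, ((j : Nat) : Int)) = p := by
          intro hh
          apply h
          have := congrArg Prod.snd hh
          simp only at this
          omega
        rw [if_neg h]
        simp only [List.mem_cons]
        tauto

lemma init_getD (n : Int) (j : Nat) (hj : j < (n + 1).toNat) :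
    ((PySem.List.pyRange 0 (n + 1) 1).map (fun i => [i])).getD j [] = [(j : Int)] := by
  have hlen : ((PySem.List.pyRange 0 (n + 1) 1).map (fun i => ([i] : List Int))).length = (n + 1).toNat := by
    rw [List.length_map, PySem.List.length_pyRange_one]
    omega
  rw [List.getD_eq_getElem _ _ (by omega), List.getElem_map, PySem.List.getElem_pyRange_one]
  simp

lemma preprocA_spec (n : Int) (results : List (Int × Int)) (hpre : Pre_solution n results) :
    (preprocA n results).1.length = (n + 1).toNat ∧
    (preprocA n results).2.length = (n + 1).toNat ∧
    (∀ (j : Nat), j < (n + 1).toNat → ∀ (x : Int),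
      (x ∈ (preprocA n results).1.getD j [] ↔ x = (j : Int) ∨ ((j : Int), x) ∈ results) ∧
      (x ∈ (preprocA n results).2.getD j [] ↔ x = (j : Int) ∨ (x, (j : Int)) ∈ results)) := by
  unfold preprocA
  obtain ⟨h1, h2, h3⟩ := preproc_fold n results hpre
    ((PySem.List.pyRange 0 (n + 1) 1).map (fun i => [i]))
    ((PySem.List.pyRange 0 (n + 1) 1).map (fun i => [i]))
    (by rw [List.length_map, PySem.List.length_pyRange_one]; omega)
    (by rw [List.length_map, PySem.List.length_pyRange_one]; omega)
  refine ⟨h1, h2, fun j hj x => ?_⟩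
  obtain ⟨hm1, hm2⟩ := h3 j hj x
  rw [init_getD n j hj] at hm1 hm2
  simp only [List.mem_singleton] at hm1 hm2
  exact ⟨hm1, hm2⟩

-- GoodData for the two freshly preprocessed arrays
lemma goodData_of_entries (F : Int → Int → Prop) (data : List (List Int))
    (hF : ∀ a b, F a b → 0 ≤ b ∧ b < (data.length : Int))
    (hent : ∀ (j : Nat), j < data.length → ∀ (x : Int),
      (x ∈ data.getD j [] ↔ x = (j : Int) ∨ F (j : Int) x)) :
    GoodData F data := by
  intro j hj
  refine ⟨?_, ?_, ?_⟩
  · rw [hent j hj]; exact Or.inl rfl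
  · intro x hx
    rcases (hent j hj x).1 hx with h | h
    · subst h; exact ⟨Relation.ReflTransGen.refl, by omega, by omega⟩
    · exact ⟨Relation.ReflTransGen.single h, (hF _ _ h).1, (hF _ _ h).2⟩
  · intro b hb
    rw [hent j hj]
    exact Or.inr hb

-- ---------- the outer loop ----------

-- B's counting loop from a given start index (the degree dictionaries spelled out)
def bCount (n : Int) (results : List (Int × Int)) (start ans : Int) : Int :=
  (PySem.List.pyRange start (n + 1) 1).foldl
    (fun ans i =>
      ans + if ((PySem.Set.union (PySem.Set.union (PySem.Set.ofList [i])
            ((PySem.List.pyGet? (degB n (satB (succB results) (results.length * results.length + 2)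
              (PySem.Set.ofList results) (PySem.Set.ofList results))).1 i).getD PySem.Set.empty))
            ((PySem.List.pyGet? (degB n (satB (succB results) (results.length * results.length + 2)
              (PySem.Set.ofList results) (PySem.Set.ofList results))).2 i).getD PySem.Set.empty)).length : Int) = n
        then 1 else 0) ans

lemma solution_alt_eq_bCount (n : Int) (results : List (Int × Int)) :
    solution_alt n results = bCount n results 0 0 := by
  simp only [solution_alt, bCount]

-- one loop body: A's counted set has the same length as B's
lemma body_eq (n : Int) (results : List (Int × Int)) (hpre : Pre_solution n results)
    (B L : List (List Int)) (hBlen : B.length = (n + 1).toNat) (hLlen : L.length = (n + 1).toNat)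
    (hGB : GoodData (Epred results) B) (hGL : GoodData (fun a b => (b, a) ∈ results) L)
    (idx : Nat) (hidx : idx < (n + 1).toNat) :
    ((PySem.Set.union
        (PySem.Set.ofList (dijkstraA B (B.flatten.length + 2) (B.getD idx []) (B.getD idx [])))
        (dijkstraA L (L.flatten.length + 2) (L.getD idx []) (L.getD idx []))).length : Int)
      = ((PySem.Set.union (PySem.Set.union (PySem.Set.ofList [((idx : Nat) : Int)])
            ((PySem.List.pyGet? (degB n (satB (succB results) (results.length * results.length + 2)
              (PySem.Set.ofList results) (PySem.Set.ofList results))).1 ((idx : Nat) : Int)).getD PySem.Set.empty))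
            ((PySem.List.pyGet? (degB n (satB (succB results) (results.length * results.length + 2)
              (PySem.Set.ofList results) (PySem.Set.ofList results))).2 ((idx : Nat) : Int)).getD PySem.Set.empty)).length : Int) := by
  have hBfuel : measD B (B.getD idx []) + 2 ≤ B.flatten.length + 2 := by
    have h1 : measD B (B.getD idx []) ≤ (PySem.Set.ofList B.flatten).length := List.length_filter_le _ _
    have h2 := PySem.Set.length_ofList_le B.flatten
    omega
  have hLfuel : measD L (L.getD idx []) + 2 ≤ L.flatten.length + 2 := by
    have h1 : measD L (L.getD idx []) ≤ (PySem.Set.ofList L.flatten).length := List.length_filter_le _ _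
    have h2 := PySem.Set.length_ofList_le L.flatten
    omega
  obtain ⟨hBsub, hBsound, hBmem⟩ := dijkstraA_mem_iff B (Epred results) hGB idx (by omega) (B.flatten.length + 2) hBfuel
  obtain ⟨hLsub, hLsound, hLmem⟩ := dijkstraA_mem_iff L (fun a b => (b, a) ∈ results) hGL idx (by omega) (L.flatten.length + 2) hLfuel
  obtain ⟨hC, hCnd⟩ := closureB_spec results
  set Cl := satB (succB results) (results.length * results.length + 2)
    (PySem.Set.ofList results) (PySem.Set.ofList results) with hCl
  congr 1
  -- both sides are Nodup lists with the same membership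
  apply List.Perm.length_eq
  rw [List.perm_ext_iff_of_nodup
    (PySem.Set.nodup_union _ _ (PySem.Set.nodup_ofList _))
    (PySem.Set.nodup_union _ _ (PySem.Set.nodup_union _ _ (PySem.Set.nodup_ofList _)))]
  intro x
  rw [PySem.Set.mem_union, PySem.Set.mem_union, PySem.Set.mem_union,
      PySem.Set.mem_ofList, PySem.Set.mem_ofList]
  rw [hBmem x, hLmem x]
  have hclb : ∀ p ∈ Cl, 0 ≤ p.1 ∧ p.1 ≤ n ∧ 0 ≤ p.2 ∧ p.2 ≤ n := by
    intro p hp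
    exact transGen_bounds n results hpre p.1 p.2 ((hC p.1 p.2).1 (by rw [← Prod.mk.eta (p := p)] at hp; exact hp))
  have hdeg := degB_entry n results hpre Cl hclb idx hidx x
  rw [hdeg.1, hdeg.2]
  have hout : (((idx : Nat) : Int), x) ∈ Cl ↔ Relation.TransGen (Epred results) ((idx : Nat) : Int) x := hC _ _
  have hin : (x, ((idx : Nat) : Int)) ∈ Cl ↔ Relation.TransGen (Epred results) x ((idx : Nat) : Int) := hC _ _
  rw [hout, hin]
  have hswap : Relation.ReflTransGen (fun a b => (b, a) ∈ results) ((idx : Nat) : Int) x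
      ↔ Relation.ReflTransGen (Epred results) x ((idx : Nat) : Int) := Relation.reflTransGen_swap
  rw [hswap]
  rw [Relation.reflTransGen_iff_eq_or_transGen, Relation.reflTransGen_iff_eq_or_transGen]
  simp only [PySem.Dict.getD_empty, PySem.Set.empty, List.not_mem_nil, List.mem_cons,
    List.not_mem_nil, false_or, or_false]
  constructor
  · rintro ((hh | hh) | (hh | hh))
    · exact Or.inl (Or.inl hh)
    · exact Or.inl (Or.inr hh)
    · exact Or.inl (Or.inl hh.symm)
    · exact Or.inr hh
  · rintro ((hh | hh) | hh)
    · exact Or.inl (Or.inl hh)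
    · exact Or.inl (Or.inr hh)
    · exact Or.inr (Or.inr hh)

lemma solLoop_eq (n : Int) (results : List (Int × Int)) (hpre : Pre_solution n results) :
    ∀ (k idx : Nat) (B L : List (List Int)) (ans : Int),
      idx + k = (n + 1).toNat →
      B.length = (n + 1).toNat → L.length = (n + 1).toNat →
      GoodData (Epred results) B → GoodData (fun a b => (b, a) ∈ results) L →
      solLoopA n k idx B L ans = bCount n results ((idx : Nat) : Int) ans := by
  intro k
  induction k with
  | zero =>
    intro idx B L ans hk hBl hLl hGB hGL
    rw [solLoopA, bCount, PySem.List.pyRange_one_eq_nil (by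
      have := Int.self_le_toNat (n + 1); omega), List.foldl_nil]
  | succ k ih =>
    intro idx B L ans hk hBl hLl hGB hGL
    have hidx : idx < (n + 1).toNat := by omega
    have hidxI : ((idx : Nat) : Int) < n + 1 := by omega
    rw [solLoopA]
    set fullB := dijkstraA B (B.flatten.length + 2) (B.getD idx []) (B.getD idx []) with hfB
    set fullL := dijkstraA L (L.flatten.length + 2) (L.getD idx []) (L.getD idx []) with hfL
    have hBfuel : measD B (B.getD idx []) + 2 ≤ B.flatten.length + 2 := by
      have h1 : measD B (B.getD idx []) ≤ (PySem.Set.ofList B.flatten).length := List.length_filter_le _ _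
      have h2 := PySem.Set.length_ofList_le B.flatten
      omega
    have hLfuel : measD L (L.getD idx []) + 2 ≤ L.flatten.length + 2 := by
      have h1 : measD L (L.getD idx []) ≤ (PySem.Set.ofList L.flatten).length := List.length_filter_le _ _
      have h2 := PySem.Set.length_ofList_le L.flatten
      omega
    obtain ⟨hBsub, hBsound, hBmem⟩ := dijkstraA_mem_iff B (Epred results) hGB idx (by omega) (B.flatten.length + 2) hBfuel
    obtain ⟨hLsub, hLsound, hLmem⟩ := dijkstraA_mem_iff L (fun a b => (b, a) ∈ results) hGL idx (by omega) (L.flatten.length + 2) hLfuel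
    -- the sandwich invariant survives writing the grown lists back
    have hGB' : GoodData (Epred results) (B.set idx fullB) := by
      intro j hj
      rw [List.length_set] at hj
      rw [getD_set_eq B idx j fullB (by omega) hj]
      simp only [List.length_set]
      by_cases h : j = idx
      · rw [if_pos h]
        subst h
        refine ⟨(hBmem _).2 Relation.ReflTransGen.refl, fun x hx => hBsound x hx, fun b hb => hBsub b ((hGB j (by omega)).2.2 b hb)⟩
      · rw [if_neg h]
        exact hGB j hj
    have hGL' : GoodData (fun a b => (b, a) ∈ results) (L.set idx fullL) := by
      intro j hj
      rw [List.length_set] at hj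
      rw [getD_set_eq L idx j fullL (by omega) hj]
      simp only [List.length_set]
      by_cases h : j = idx
      · rw [if_pos h]
        subst h
        refine ⟨(hLmem _).2 Relation.ReflTransGen.refl, fun x hx => hLsound x hx, fun b hb => hLsub b ((hGL j (by omega)).2.2 b hb)⟩
      · rw [if_neg h]
        exact hGL j hj
    rw [ih (idx + 1) (B.set idx fullB) (L.set idx fullL) _
      (by omega) (by rw [List.length_set]; exact hBl) (by rw [List.length_set]; exact hLl) hGB' hGL']
    -- peel one element off B's counting range
    rw [show bCount n results ((idx : Nat) : Int) ans
        = bCount n results (((idx : Nat) : Int) + 1)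
            (ans + if ((PySem.Set.union (PySem.Set.union (PySem.Set.ofList [((idx : Nat) : Int)])
              ((PySem.List.pyGet? (degB n (satB (succB results) (results.length * results.length + 2)
                (PySem.Set.ofList results) (PySem.Set.ofList results))).1 ((idx : Nat) : Int)).getD PySem.Set.empty))
              ((PySem.List.pyGet? (degB n (satB (succB results) (results.length * results.length + 2)
                (PySem.Set.ofList results) (PySem.Set.ofList results))).2 ((idx : Nat) : Int)).getD PySem.Set.empty)).length : Int) = n
              then 1 else 0) from by
      rw [bCount, PySem.List.pyRange_one_cons hidxI, List.foldl_cons]; rfl]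
    have hcast : (((idx + 1 : Nat) : Nat) : Int) = ((idx : Nat) : Int) + 1 := by push_cast; ring
    rw [hcast]
    congr 2
    rw [hfB, hfL]
    rw [body_eq n results hpre B L hBl hLl hGB hGL idx hidx]

-- ===== VERDICT (by name: the statement is the Claim_ definition above) =====
theorem solution_spec : Claim_equal_solution := by
  intro n results hdom hpre
  unfold Spec_solution
  obtain ⟨hB1, hB2, hB3⟩ := preprocA_spec n results hpre
  have hm0 : (n + 1 : Int) ≤ ((n + 1).toNat : Int) := Int.self_le_toNat _
  have hGB : GoodData (Epred results) (preprocA n results).1 := by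
    apply goodData_of_entries (Epred results) _
      (fun a b hab => by
        obtain ⟨u1, u2, u3, u4⟩ := hpre (a, b) hab
        simp only at u1 u2 u3 u4
        rw [hB1]
        omega)
      (fun j hj x => by rw [hB1] at hj; exact (hB3 j hj x).1)
  have hGL : GoodData (fun a b => (b, a) ∈ results) (preprocA n results).2 := by
    apply goodData_of_entries _ _
      (fun a b hab => by
        obtain ⟨u1, u2, u3, u4⟩ := hpre (b, a) hab
        simp only at u1 u2 u3 u4
        rw [hB2]
        omega)
      (fun j hj x => by rw [hB2] at hj; exact (hB3 j hj x).2)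
  have := solLoop_eq n results hpre (n + 1).toNat 0 (preprocA n results).1 (preprocA n results).2 0
    (by omega) hB1 hB2 hGB hGL
  rw [solution_alt_eq_bCount]
  show solLoopA n (preprocA n results).1.length 0 (preprocA n results).1 (preprocA n results).2 0
      = bCount n results 0 0
  rw [hB1, this]
  norm_num
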